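-- pv_equiv track=rewrite | github.com/tien0246/Simple-Bittorent | Node1/nod.py | parse_bitfield
-- ===== SOURCE A (Python) =====
-- def parse_bitfield(bitfield, num_pieces):
--     peer_pieces = [False] * num_pieces
--     for i in range(num_pieces):
--         byte_index = i // 8
--         bit_index = 7 - (i % 8)
--         if byte_index < len(bitfield):
--             if bitfield[byte_index] & (1 << bit_index):
--                 peer_pieces[i] = True
--     return peer_pieces
-- ===== SOURCE B (Python) =====
-- def parse_bitfield(bitfield, num_pieces):
--     n = max(num_pieces, 0)
--     bits = []
--     for byte in bitfield:
--         for k in range(7, -1, -1):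
--             bits.append(bool(byte & (1 << k)))
--     if len(bits) >= n:
--         return bits[:n]
--     return bits + [False] * (n - len(bits))
-- ===== Notes on version B (the rewrite author's own statement) =====
-- stated objective: alternative
-- what changed: Replaces A's flat per-piece loop, which recomputes a byte index and bit offset for every piece, by a byte-wise expansion that emits the 8 MSB-first bits of each byte and then truncates or pads the bit list to exactly num_pieces entries.
import Mathlib
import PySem

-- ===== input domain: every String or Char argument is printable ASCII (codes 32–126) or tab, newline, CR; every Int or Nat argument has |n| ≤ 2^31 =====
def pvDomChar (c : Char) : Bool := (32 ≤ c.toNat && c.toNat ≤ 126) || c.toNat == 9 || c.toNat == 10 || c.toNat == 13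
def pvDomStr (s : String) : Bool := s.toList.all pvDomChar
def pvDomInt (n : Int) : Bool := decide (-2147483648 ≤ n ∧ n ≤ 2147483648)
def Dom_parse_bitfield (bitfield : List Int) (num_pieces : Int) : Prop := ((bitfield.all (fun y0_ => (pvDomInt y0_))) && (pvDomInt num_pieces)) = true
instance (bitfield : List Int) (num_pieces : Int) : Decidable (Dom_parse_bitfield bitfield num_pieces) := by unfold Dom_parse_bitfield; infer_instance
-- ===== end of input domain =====

-- B replaces A's flat per-piece loop (computing byte/bit offsets for every piece) by a byte-wise
-- MSB-first expansion of the whole bitfield followed by a truncate-or-pad to num_pieces (objective: alternative).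

-- ===== PORT A =====
def parse_bitfield (bitfield : List Int) (num_pieces : Int) : List Bool :=
  (PySem.List.pyRange 0 num_pieces 1).foldl
    (fun peer_pieces i =>
      let byte_index := PySem.Int.floordiv i 8
      let bit_index := 7 - PySem.Int.mod i 8
      if byte_index < (bitfield.length : Int) then
        -- the guard guarantees 0 ≤ byte_index < len(bitfield), so pyGetD's default is never used
        if PySem.Int.band (PySem.List.pyGetD bitfield byte_index 0) ((1 : Int) <<< bit_index.toNat) ≠ 0 then
          PySem.List.pySetD peer_pieces i true
        else peer_pieces
      else peer_pieces)
    (List.replicate num_pieces.toNat false)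

-- ===== PORT B =====
def parse_bitfield_alt (bitfield : List Int) (num_pieces : Int) : List Bool :=
  let n := max num_pieces 0
  let bits := bitfield.foldl
    (fun bits byte =>
      (PySem.List.pyRange 7 (-1) (-1)).foldl
        (fun bits k => bits ++ [decide (PySem.Int.band byte ((1 : Int) <<< k.toNat) ≠ 0)]) bits)
    []
  if n ≤ (bits.length : Int) then PySem.List.slice bits none (some n)
  else bits ++ List.replicate (n - (bits.length : Int)).toNat false

-- ===== PRECONDITION & SPEC =====
def Spec_parse_bitfield (bitfield : List Int) (num_pieces : Int) (out : List Bool) : Prop := out = parse_bitfield_alt bitfield num_pieces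
instance (bitfield : List Int) (num_pieces : Int) (out : List Bool) : Decidable (Spec_parse_bitfield bitfield num_pieces out) := by unfold Spec_parse_bitfield; infer_instance

-- ===== CLAIM (what is proved, stated in full; the proofs are below) =====
def Claim_equal_parse_bitfield : Prop := ∀ (bitfield : List Int) (num_pieces : Int), Dom_parse_bitfield bitfield num_pieces → Spec_parse_bitfield bitfield num_pieces (parse_bitfield bitfield num_pieces)

-- ===== LEMMAS AND PROOFS =====

/-- The bit both programs test for piece `j`: bit `7 - j % 8` (MSB first) of byte `j / 8`;
`false` past the end of the bitfield. -/
def pvBit (bitfield : List Int) (j : Nat) : Bool :=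
  match bitfield[j / 8]? with
  | some b => decide (PySem.Int.band b ((1 : Int) <<< (7 - j % 8)) ≠ 0)
  | none => false

theorem pvBit_of_ge (bitfield : List Int) (j : Nat) (h : bitfield.length ≤ j / 8) :
    pvBit bitfield j = false := by
  simp [pvBit, List.getElem?_eq_none h]

/-- B's inner loop appends the 8 MSB-first bits of one byte. -/
theorem pvChunk_eq (b : Int) (acc : List Bool) :
    (PySem.List.pyRange 7 (-1) (-1)).foldl
        (fun bits k => bits ++ [decide (PySem.Int.band b ((1 : Int) <<< k.toNat) ≠ 0)]) acc
      = acc ++ (List.range 8).map (fun k => pvBit [b] k) := by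
  rw [PySem.List.foldl_append_singleton_eq_map]
  have h1 : PySem.List.pyRange 7 (-1) (-1) = [7, 6, 5, 4, 3, 2, 1, 0] := by decide
  rw [h1]
  norm_num [pvBit, List.range_succ]
  and_intros <;> exact Iff.rfl

theorem pvBit_cons_small (b : Int) (t : List Int) (k : Nat) (hk : k < 8) :
    pvBit (b :: t) k = pvBit [b] k := by
  have h : k / 8 = 0 := Nat.div_eq_of_lt hk
  simp [pvBit, h]

theorem pvBit_cons_add (b : Int) (t : List Int) (k : Nat) :
    pvBit (b :: t) (8 + k) = pvBit t k := by
  have h1 : (8 + k) / 8 = 1 + k / 8 := by omega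
  have h2 : (8 + k) % 8 = k % 8 := by omega
  simp [pvBit, h1, h2, Nat.add_comm 1 (k / 8)]

/-- B's byte loop produces exactly the bit `pvBit bitfield j` at every position `j < 8·len`. -/
theorem pvBits_eq (bitfield : List Int) :
    bitfield.foldl
      (fun bits byte =>
        (PySem.List.pyRange 7 (-1) (-1)).foldl
          (fun bits k => bits ++ [decide (PySem.Int.band byte ((1 : Int) <<< k.toNat) ≠ 0)]) bits)
      []
    = (List.range (8 * bitfield.length)).map (pvBit bitfield) := by
  have key : ∀ (l : List Int),
      l.flatMap (fun b => (List.range 8).map (fun k => pvBit [b] k))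
        = (List.range (8 * l.length)).map (pvBit l) := by
    intro l
    induction l with
    | nil => simp
    | cons b t ih =>
      have hlen : 8 * (b :: t).length = 8 + 8 * t.length := by simp; ring
      have h1 : (List.range 8).map (fun k => pvBit [b] k)
          = (List.range 8).map (pvBit (b :: t)) :=
        List.map_congr_left (fun k hk => (pvBit_cons_small b t k (List.mem_range.1 hk)).symm)
      have h2 : (List.range (8 * t.length)).map (pvBit t)
          = (List.range (8 * t.length)).map (fun k => pvBit (b :: t) (8 + k)) :=
        List.map_congr_left (fun k _ => (pvBit_cons_add b t k).symm)
      rw [List.flatMap_cons, ih, hlen, List.range_add, List.map_append, List.map_map,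
        h1, h2]
      rfl
  simp only [pvChunk_eq]
  rw [PySem.List.foldl_append_eq_flatMap, List.nil_append, key]

/-- A's loop, processed up to piece `m`, has decided the first `m` entries. -/
theorem pvA_loop (bitfield : List Int) (N : Nat) :
    ∀ m, m ≤ N →
      (PySem.List.pyRange 0 (m : Int) 1).foldl
        (fun peer_pieces i =>
          if PySem.Int.floordiv i 8 < (bitfield.length : Int) then
            if PySem.Int.band (PySem.List.pyGetD bitfield (PySem.Int.floordiv i 8) 0)
                ((1 : Int) <<< (7 - PySem.Int.mod i 8).toNat) ≠ 0 then
              PySem.List.pySetD peer_pieces i true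
            else peer_pieces
          else peer_pieces)
        (List.replicate N false)
      = (List.range m).map (pvBit bitfield) ++ List.replicate (N - m) false := by
  intro m
  induction m with
  | zero => simp [PySem.List.pyRange_one_eq_nil]
  | succ m ih =>
    intro hm
    have hprev := ih (by omega)
    have hsplit : PySem.List.pyRange 0 ((m : Int) + 1) 1
        = PySem.List.pyRange 0 (m : Int) 1 ++ [(m : Int)] :=
      PySem.List.pyRange_one_succ_right (by positivity)
    have hcast : (((m + 1 : Nat)) : Int) = (m : Int) + 1 := by push_cast; ring
    rw [hcast, hsplit, List.foldl_append, hprev]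
    simp only [List.foldl_cons, List.foldl_nil]
    have hbi : PySem.Int.floordiv (m : Int) 8 = ((m / 8 : Nat) : Int) := by
      exact_mod_cast PySem.Int.floordiv_natCast m 8
    have hmo : PySem.Int.mod (m : Int) 8 = ((m % 8 : Nat) : Int) := by
      exact_mod_cast PySem.Int.mod_natCast m 8
    have hti : ((7 : Int) - ((m % 8 : Nat) : Int)).toNat = 7 - m % 8 := by omega
    have hrep : N - m = (N - (m + 1)) + 1 := by omega
    have hsetlen : ((List.range m).map (pvBit bitfield)).length = m := by simp
    have hset : ∀ r : List Bool,
        ((List.range m).map (pvBit bitfield) ++ false :: r).set m true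
          = (List.range m).map (pvBit bitfield) ++ true :: r := by
      intro r
      rw [List.set_append_right _ _ (by omega)]
      simp [hsetlen]
    have hrng : (List.range (m + 1)).map (pvBit bitfield)
        = (List.range m).map (pvBit bitfield) ++ [pvBit bitfield m] := by
      rw [List.range_succ, List.map_append]; rfl
    simp only [hbi, hmo, hti]
    by_cases hin : m / 8 < bitfield.length
    · have hgd : PySem.List.pyGetD bitfield ((m / 8 : Nat) : Int) 0 = bitfield[m / 8] := by
        rw [PySem.List.pyGetD_natCast]
        exact List.getD_eq_getElem _ _ hin
      have hbit : pvBit bitfield m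
          = decide (PySem.Int.band bitfield[m / 8] ((1 : Int) <<< (7 - m % 8)) ≠ 0) := by
        simp [pvBit, List.getElem?_eq_getElem hin]
      rw [if_pos (by exact_mod_cast hin), hgd]
      by_cases hb : PySem.Int.band bitfield[m / 8] ((1 : Int) <<< (7 - m % 8)) ≠ 0
      · rw [if_pos hb, PySem.List.pySetD_natCast, hrep, List.replicate_succ, hset, hrng,
          hbit, decide_eq_true hb]
        simp
      · rw [if_neg hb, hrep, List.replicate_succ, hrng, hbit, decide_eq_false hb]
        simp
    · rw [if_neg (by exact_mod_cast hin)]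
      rw [hrep, List.replicate_succ, hrng, pvBit_of_ge _ _ (by omega)]
      simp
-- ===== VERDICT (by name: the statement is the Claim_ definition above) =====
theorem parse_bitfield_spec : Claim_equal_parse_bitfield := by
  intro bitfield num_pieces _dom
  unfold Spec_parse_bitfield
  simp only [parse_bitfield, parse_bitfield_alt, pvBits_eq]
  by_cases hneg : num_pieces < 0
  · have h0 : num_pieces.toNat = 0 := by omega
    have hmax : max num_pieces 0 = 0 := by omega
    rw [PySem.List.pyRange_one_eq_nil (by omega), h0, hmax,
      if_pos (by positivity), PySem.List.slice_to _ (by omega : (0:Int) ≤ 0)]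
    simp
  · have hneg : (0 : Int) ≤ num_pieces := by omega
    have hNP : ((num_pieces.toNat : Nat) : Int) = num_pieces := Int.toNat_of_nonneg hneg
    set N := num_pieces.toNat with hN
    rw [← hNP, pvA_loop bitfield N N (le_refl N), Nat.sub_self, List.replicate_zero,
      List.append_nil, max_eq_left (by positivity : (0:Int) ≤ (N:Int)),
      List.length_map, List.length_range]
    by_cases hle : (N : Int) ≤ ((8 * bitfield.length : Nat) : Int)
    · rw [if_pos hle, PySem.List.slice_to _ (by positivity), Int.toNat_natCast,
        ← List.map_take, List.take_range]
      congr 2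
      omega
    · rw [if_neg hle]
      rw [show ((N : Int) - ((8 * bitfield.length : Nat) : Int)).toNat
            = N - 8 * bitfield.length by omega]
      have hsp : (List.range N).map (pvBit bitfield)
          = (List.range (8 * bitfield.length)).map (pvBit bitfield)
            ++ List.replicate (N - 8 * bitfield.length) false := by
        have hNsplit : N = 8 * bitfield.length + (N - 8 * bitfield.length) := by omega
        have h2 : (List.range (N - 8 * bitfield.length)).map
              (fun k => pvBit bitfield (8 * bitfield.length + k))
            = List.replicate (N - 8 * bitfield.length) false := by
          refine List.eq_replicate_iff.2 ⟨by simp, ?_⟩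
          intro x hx
          obtain ⟨k, _, rfl⟩ := List.mem_map.1 hx
          exact pvBit_of_ge _ _ (by omega)
        conv_lhs => rw [hNsplit]
        rw [List.range_add, List.map_append, List.map_map]
        simp only [Function.comp_def]
        rw [h2]
      rw [hsp]
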